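-- pv_equiv track=rewrite | github.com/maurosoria/dirsearch | thirdparty/pyparsing/util.py | _collapseStringToRanges
-- ===== SOURCE A (Python) =====
-- import collections
-- import itertools
--
-- def _collapseStringToRanges(s, re_escape=True):
--     def is_consecutive(c):
--         c_int = ord(c)
--         is_consecutive.prev, prev = c_int, is_consecutive.prev
--         if c_int - prev > 1:
--             is_consecutive.value = next(is_consecutive.counter)
--         return is_consecutive.value
--
--     is_consecutive.prev = 0
--     is_consecutive.counter = itertools.count()
--     is_consecutive.value = -1
--
--     def escape_re_range_char(c):
--         return "\\" + c if c in r"\^-][" else c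
--
--     def no_escape_re_range_char(c):
--         return c
--
--     if not re_escape:
--         escape_re_range_char = no_escape_re_range_char
--
--     ret = []
--     for _, chars in itertools.groupby(sorted(s), key=is_consecutive):
--         first = last = next(chars)
--         last = collections.deque(itertools.chain(iter([last]), chars), maxlen=1).pop()
--         if first == last:
--             ret.append(escape_re_range_char(first))
--         else:
--             ret.append(
--                 "{}-{}".format(escape_re_range_char(first), escape_re_range_char(last))
--             )
--     return "".join(ret)
-- ===== SOURCE B (Python) =====
-- def _collapseStringToRanges(s, re_escape=True):
--     def escape_re_range_char(c):
--         return "\\" + c if c in r"\^-][" else c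
--
--     if not re_escape:
--         escape_re_range_char = lambda c: c
--
--     def flush(first, last):
--         if first == last:
--             return escape_re_range_char(first)
--         return "{}-{}".format(escape_re_range_char(first), escape_re_range_char(last))
--
--     chars = sorted(s)
--     if not chars:
--         return ""
--     out = []
--     first = last = chars[0]
--     for c in chars[1:]:
--         if ord(c) - ord(last) > 1:
--             out.append(flush(first, last))
--             first = last = c
--         else:
--             last = c
--     out.append(flush(first, last))
--     return "".join(out)
-- ===== Notes on version B (the rewrite author's own statement) =====
-- stated objective: simpler
-- what changed: Replaces the stateful-key itertools.groupby/deque/chain machinery with one explicit linear pass over the sorted characters that keeps the current run's first/last and flushes on a gap > 1 (same O(n log n) sort, lower constant factor).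
import Mathlib
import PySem

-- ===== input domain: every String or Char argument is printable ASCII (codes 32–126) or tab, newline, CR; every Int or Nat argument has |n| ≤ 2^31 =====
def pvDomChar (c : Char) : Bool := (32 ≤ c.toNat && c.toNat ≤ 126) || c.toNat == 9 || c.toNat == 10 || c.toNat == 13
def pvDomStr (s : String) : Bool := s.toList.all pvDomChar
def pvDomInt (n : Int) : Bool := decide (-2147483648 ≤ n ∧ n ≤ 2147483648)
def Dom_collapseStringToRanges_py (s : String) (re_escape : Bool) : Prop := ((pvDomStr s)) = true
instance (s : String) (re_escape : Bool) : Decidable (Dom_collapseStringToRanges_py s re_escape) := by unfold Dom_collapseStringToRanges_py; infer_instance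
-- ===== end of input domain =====

-- B replaces the stateful-key itertools.groupby/deque machinery by one explicit linear pass
-- keeping the current run's first/last characters (objective: simpler).

-- ===== PORT A =====
-- escape_re_range_char / no_escape_re_range_char, selected by re_escape (over List Char)
def escSelA (re : Bool) (c : Char) : List Char :=
  if re then (if ['\\', '^', '-', ']', '['].contains c then ['\\', c] else [c]) else [c]

-- is_consecutive: assigns the groupby key to each char, threading prev/value/counter state
def keysA : List Char → Int → Int → Int → List (Int × Char)
  | [], _, _, _ => []
  | c :: rest, prev, value, counter =>
    if (c.toNat : Int) - prev > 1 then
      (counter, c) :: keysA rest (c.toNat : Int) counter (counter + 1)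
    else
      (value, c) :: keysA rest (c.toNat : Int) value counter

-- itertools.groupby: runs of equal keys, ported as the corresponding grouping function
def groupbyA : List (Int × Char) → List (Int × List Char)
  | [] => []
  | (k, c) :: rest =>
    match groupbyA rest with
    | (k', cs) :: gs => if k == k' then (k, c :: cs) :: gs else (k, [c]) :: (k', cs) :: gs
    | [] => [(k, [c])]

-- loop body: first = next(chars), last = last element of the group
def renderA (re : Bool) (g : Int × List Char) : List Char :=
  match g.2 with
  | [] => []
  | c :: cs =>
    let first := c
    let last := cs.getLastD c
    if first = last then escSelA re first
    else escSelA re first ++ '-' :: escSelA re last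

def collapseStringToRanges_py (s : String) (re_escape : Bool) : String :=
  String.mk (((groupbyA (keysA (PySem.List.sorted s.toList (fun c => c) false) 0 (-1) 0)).map
    (renderA re_escape)).flatten)

-- ===== PORT B =====
def escB (re : Bool) (c : Char) : List Char :=
  if re && ['\\', '^', '-', ']', '['].contains c then ['\\', c] else [c]

def flushB (re : Bool) (first last : Char) : List Char :=
  if first = last then escB re first
  else escB re first ++ '-' :: escB re last

def goB (re : Bool) : List Char → Char → Char → List Char → List Char
  | [], first, last, acc => acc ++ flushB re first last
  | c :: rest, first, last, acc =>
    if (c.toNat : Int) - (last.toNat : Int) > 1 then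
      goB re rest c c (acc ++ flushB re first last)
    else
      goB re rest first c acc

def collapseStringToRanges_py_alt (s : String) (re_escape : Bool) : String :=
  match PySem.List.sorted s.toList (fun c => c) false with
  | [] => ""
  | c :: rest => String.mk (goB re_escape rest c c [])

-- ===== PRECONDITION & SPEC =====
def Spec_collapseStringToRanges_py (s : String) (re_escape : Bool) (out : String) : Prop := out = collapseStringToRanges_py_alt s re_escape
instance (s : String) (re_escape : Bool) (out : String) : Decidable (Spec_collapseStringToRanges_py s re_escape out) := by unfold Spec_collapseStringToRanges_py; infer_instance

-- ===== CLAIM (what is proved, stated in full; the proofs are below) =====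
def Claim_equal_collapseStringToRanges_py : Prop := ∀ (s : String) (re_escape : Bool), Dom_collapseStringToRanges_py s re_escape → Spec_collapseStringToRanges_py s re_escape (collapseStringToRanges_py s re_escape)

-- ===== LEMMAS AND PROOFS =====

-- maximal gap≤1 runs of a list, as lists of chars (built back to front)
def runsP : List Char → List (List Char)
  | [] => []
  | c :: rest =>
    match runsP rest with
    | (d :: g) :: gs =>
      if (d.toNat : Int) - (c.toNat : Int) > 1 then [c] :: (d :: g) :: gs
      else (c :: d :: g) :: gs
    | _ => [[c]]

-- the same runs as (first, last) pairs
def runsQ : List Char → List (Char × Char)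
  | [] => []
  | c :: rest =>
    match runsQ rest with
    | (f, l) :: rs =>
      if (f.toNat : Int) - (c.toNat : Int) > 1 then (c, c) :: (f, l) :: rs
      else (c, l) :: rs
    | [] => [(c, c)]

-- merge a pending (first,last) run into the runs of the remaining list
def consR (p : Char × Char) : List (Char × Char) → List (Char × Char)
  | (f, l) :: rs => if (f.toNat : Int) - (p.2.toNat : Int) > 1 then p :: (f, l) :: rs else (p.1, l) :: rs
  | [] => [p]

lemma escSelA_eq_escB (re : Bool) (c : Char) : escSelA re c = escB re c := by
  cases re <;> simp [escSelA, escB]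

lemma consR_self (c : Char) (rest : List Char) : consR (c, c) (runsQ rest) = runsQ (c :: rest) := by
  rw [runsQ]
  cases hr : runsQ rest with
  | nil => simp [consR]
  | cons q rs =>
    obtain ⟨qf, ql⟩ := q
    by_cases h2 : (qf.toNat : Int) - (c.toNat : Int) > 1 <;> simp [consR, h2]

lemma goB_spec (re : Bool) : ∀ (l : List Char) (first last : Char) (acc : List Char),
    goB re l first last acc = acc ++ ((consR (first, last) (runsQ l)).map (fun p => flushB re p.1 p.2)).flatten := by
  intro l
  induction l with
  | nil => intro f la acc; simp [goB, consR, runsQ]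
  | cons c rest ih =>
    intro f la acc
    by_cases h : (c.toNat : Int) - (la.toNat : Int) > 1
    · rw [goB, if_pos h, ih]
      have hc : consR (f, la) (runsQ (c :: rest)) = (f, la) :: runsQ (c :: rest) := by
        rw [runsQ]
        cases hr : runsQ rest with
        | nil => simp [consR, h]
        | cons p rs =>
          obtain ⟨pf, pl⟩ := p
          by_cases h2 : (pf.toNat : Int) - (c.toNat : Int) > 1 <;> simp [consR, h, h2]
      rw [consR_self, hc]
      simp [List.append_assoc]
    · rw [goB, if_neg h, ih]
      have hc : consR (f, la) (runsQ (c :: rest)) = consR (f, c) (runsQ rest) := by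
        rw [runsQ]
        cases hr : runsQ rest with
        | nil => simp [consR, h]
        | cons p rs =>
          obtain ⟨pf, pl⟩ := p
          by_cases h2 : (pf.toNat : Int) - (c.toNat : Int) > 1 <;> simp [consR, h, h2]
      rw [hc]

-- correspondence of the two run representations
lemma runsQ_eq_runsP : ∀ l : List Char,
    runsQ l = (runsP l).map (fun g => (g.headD 'a', g.getLastD 'a')) ∧ ∀ g ∈ runsP l, g ≠ [] := by
  intro l
  induction l with
  | nil => simp [runsQ, runsP]
  | cons c rest ih =>
    obtain ⟨heq, hne⟩ := ih
    constructor
    · rw [runsQ, runsP, heq]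
      cases hr : runsP rest with
      | nil => simp
      | cons g gs =>
        cases g with
        | nil => exact absurd rfl (hne [] (hr ▸ List.mem_cons_self))
        | cons d g' =>
          by_cases h2 : (d.toNat : Int) - (c.toNat : Int) > 1
          · simp [h2]
          · simp [h2]
    · intro g hg
      rw [runsP] at hg
      cases hr : runsP rest with
      | nil => rw [hr] at hg; simp at hg; simp [hg]
      | cons g0 gs =>
        rw [hr] at hg
        cases g0 with
        | nil => exact absurd rfl (hne [] (hr ▸ List.mem_cons_self))
        | cons d g' =>
          by_cases h2 : (d.toNat : Int) - (c.toNat : Int) > 1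
          · simp [h2] at hg
            rcases hg with h | h | h
            · simp [h]
            · simp [h]
            · exact hne g (hr ▸ List.mem_cons_of_mem _ h)
          · simp [h2] at hg
            rcases hg with h | h
            · simp [h]
            · exact hne g (hr ▸ List.mem_cons_of_mem _ h)

-- head group of runsP (c :: rest) starts with c
lemma runsP_cons_head (c : Char) (rest : List Char) :
    ∃ t gs, runsP (c :: rest) = (c :: t) :: gs := by
  rw [runsP]
  rcases runsP rest with _ | ⟨g, gs⟩
  · exact ⟨[], [], rfl⟩
  · cases g with
    | nil => exact ⟨[], [], rfl⟩
    | cons d g' =>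
      by_cases h : (d.toNat : Int) - (c.toNat : Int) > 1
      · exact ⟨[], (d :: g') :: gs, by simp [h]⟩
      · exact ⟨d :: g', gs, by simp [h]⟩

-- one step of A's pipeline: prepending char c with key = current value
lemma gb_aux (c : Char) (rest : List Char) (val cntr : Int) (hvc : val < cntr)
    (IH : ∀ v' cnt' : Int, v' < cnt' →
      ((groupbyA (keysA rest (c.toNat : Int) v' cnt')).map Prod.snd = runsP rest ∧
       (groupbyA (keysA rest (c.toNat : Int) v' cnt')).head?.map Prod.fst =
         rest.head?.map (fun c' => if (c'.toNat : Int) - (c.toNat : Int) > 1 then cnt' else v'))) :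
    (groupbyA ((val, c) :: keysA rest (c.toNat : Int) val cntr)).map Prod.snd = runsP (c :: rest) ∧
    (groupbyA ((val, c) :: keysA rest (c.toNat : Int) val cntr)).head?.map Prod.fst = some val := by
  obtain ⟨ih1, ih2⟩ := IH val cntr hvc
  cases rest with
  | nil => simp [keysA, groupbyA, runsP]
  | cons c' r' =>
    rw [groupbyA]
    cases hr : groupbyA (keysA (c' :: r') (c.toNat : Int) val cntr) with
    | nil =>
      exfalso
      rw [hr] at ih1
      obtain ⟨t, gs, hp⟩ := runsP_cons_head c' r'
      rw [hp] at ih1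
      simp at ih1
    | cons g gs =>
      obtain ⟨k', cs⟩ := g
      rw [hr] at ih1 ih2
      obtain ⟨t, gs0, hp⟩ := runsP_cons_head c' r'
      rw [hp] at ih1
      simp only [List.map_cons, List.cons.injEq] at ih1
      obtain ⟨hcs, hgs⟩ := ih1
      simp only [List.head?_cons, Option.map_some] at ih2
      have hk' : k' = if (c'.toNat : Int) - (c.toNat : Int) > 1 then cntr else val :=
        Option.some.inj ih2
      by_cases h2 : (c'.toNat : Int) - (c.toNat : Int) > 1
      · have hne : (val == k') = false := by
          rw [hk', if_pos h2]
          simp only [beq_eq_false_iff_ne, ne_eq]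
          omega
        simp only [hne, Bool.false_eq_true, if_false, List.map_cons, List.head?_cons,
          Option.map_some]
        refine ⟨?_, by simp⟩
        rw [runsP, hp]
        simp [h2, hcs, hgs]
      · have heq : (val == k') = true := by rw [hk', if_neg h2]; simp
        simp only [heq, if_true, List.map_cons, List.head?_cons, Option.map_some]
        refine ⟨?_, by simp⟩
        rw [runsP, hp]
        simp [h2, hcs, hgs]

-- A's pipeline after sorting: groupby of the stateful keys = the gap runs
lemma groupbyA_keysA : ∀ (l : List Char) (prev value counter : Int), value < counter →
    ((groupbyA (keysA l prev value counter)).map Prod.snd = runsP l ∧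
     (groupbyA (keysA l prev value counter)).head?.map Prod.fst =
       l.head?.map (fun c => if (c.toNat : Int) - prev > 1 then counter else value)) := by
  intro l
  induction l with
  | nil => intro p v cnt _; simp [keysA, groupbyA, runsP]
  | cons c rest ih =>
    intro p v cnt hvc
    by_cases h : (c.toNat : Int) - p > 1
    · rw [keysA, if_pos h]
      have := gb_aux c rest cnt (cnt + 1) (by omega) (fun v' cnt' h' => ih (c.toNat : Int) v' cnt' h')
      refine ⟨this.1, ?_⟩
      simp only [this.2, List.head?_cons, Option.map_some, if_pos h]
    · rw [keysA, if_neg h]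
      -- key is the unchanged value
      have := gb_aux c rest v cnt hvc (fun v' cnt' h' => ih (c.toNat : Int) v' cnt' h')
      refine ⟨this.1, ?_⟩
      simp only [this.2, List.head?_cons, Option.map_some, if_neg h]

-- rendering a nonempty group equals flushing its (first, last) pair
lemma renderA_eq_flushB (re : Bool) (k : Int) (d : Char) (g : List Char) :
    renderA re (k, d :: g) = flushB re ((d :: g).headD 'a') ((d :: g).getLastD 'a') := by
  simp only [renderA, flushB, List.headD_cons, List.getLastD_cons]
  rw [escSelA_eq_escB, escSelA_eq_escB]

-- both pipelines over an arbitrary nonempty sorted list agree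
lemma pipelines_eq_cons (re : Bool) (c : Char) (rest : List Char) :
    ((groupbyA (keysA (c :: rest) 0 (-1) 0)).map (renderA re)).flatten = goB re rest c c [] := by
  have hA := groupbyA_keysA (c :: rest) 0 (-1) 0 (by omega)
  have hB := goB_spec re rest c c []
  rw [hB, consR_self, (runsQ_eq_runsP (c :: rest)).1]
  have hne := (runsQ_eq_runsP (c :: rest)).2
  have hmap := hA.1
  have : (groupbyA (keysA (c :: rest) 0 (-1) 0)).map (renderA re) =
      (runsP (c :: rest)).map (fun g => flushB re (g.headD 'a') (g.getLastD 'a')) := by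
    calc (groupbyA (keysA (c :: rest) 0 (-1) 0)).map (renderA re)
        = ((groupbyA (keysA (c :: rest) 0 (-1) 0)).map Prod.snd).map
            (fun g => flushB re (g.headD 'a') (g.getLastD 'a')) := by
          rw [List.map_map]
          apply List.map_congr_left
          intro a ha
          obtain ⟨k, g⟩ := a
          cases g with
          | nil =>
            exfalso
            have : ([] : List Char) ∈ runsP (c :: rest) := by
              rw [← hmap]
              exact List.mem_map.mpr ⟨(k, []), ha, rfl⟩
            exact hne [] this rfl
          | cons d g' => exact renderA_eq_flushB re k d g'
      _ = (runsP (c :: rest)).map (fun g => flushB re (g.headD 'a') (g.getLastD 'a')) := by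
          rw [hmap]
  rw [this, List.map_map]
  rfl

-- ===== VERDICT (by name: the statement is the Claim_ definition above) =====
theorem collapseStringToRanges_py_spec : Claim_equal_collapseStringToRanges_py := by
  intro s re _
  unfold Spec_collapseStringToRanges_py
  simp only [collapseStringToRanges_py, collapseStringToRanges_py_alt]
  cases h : PySem.List.sorted s.toList (fun c => c) false with
  | nil => simp only [keysA, groupbyA, List.map_nil, List.flatten_nil]; rfl
  | cons c rest => rw [pipelines_eq_cons]
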